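-- pv_equiv track=rewrite | github.com/sudomakeinstall/cardio | src/cardio/orientation.py | is_valid_axcode
-- ===== SOURCE A (Python) =====
-- def is_valid_axcode(axcode: str) -> bool:
--     """Validate medical imaging axcode string.
--
--     Valid axcode must have exactly 3 uppercase characters with:
--     - One of L or R (Left/Right)
--     - One of A or P (Anterior/Posterior)
--     - One of S or I (Superior/Inferior)
--     - No repeated characters
--     """
--     if len(axcode) != 3:
--         return False
--
--     if len(set(axcode)) != 3:
--         return False
--
--     has_lr = any(c in axcode for c in "LR")
--     has_ap = any(c in axcode for c in "AP")
--     has_si = any(c in axcode for c in "SI")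
--
--     valid_chars = set("LRAPSI")
--     has_only_valid = all(c in valid_chars for c in axcode)
--
--     return has_lr and has_ap and has_si and has_only_valid
-- ===== SOURCE B (Python) =====
-- _AXIS = {"L": 0, "R": 0, "A": 1, "P": 1, "S": 2, "I": 2}
--
--
-- def is_valid_axcode(axcode: str) -> bool:
--     """Validate medical imaging axcode: 3 chars, one per anatomical axis."""
--     if len(axcode) != 3:
--         return False
--     seen = set()
--     for c in axcode:
--         axis = _AXIS.get(c)
--         if axis is None or axis in seen:
--             return False
--         seen.add(axis)
--     return True
-- ===== Notes on version B (the rewrite author's own statement) =====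
-- stated objective: simpler
-- what changed: Replaces A's five independent scans (set-size distinctness, three any-membership tests, an all-valid scan) with one classifying pass that maps each char to its anatomical axis and rejects on an unknown char or a repeated axis.
import Mathlib
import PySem

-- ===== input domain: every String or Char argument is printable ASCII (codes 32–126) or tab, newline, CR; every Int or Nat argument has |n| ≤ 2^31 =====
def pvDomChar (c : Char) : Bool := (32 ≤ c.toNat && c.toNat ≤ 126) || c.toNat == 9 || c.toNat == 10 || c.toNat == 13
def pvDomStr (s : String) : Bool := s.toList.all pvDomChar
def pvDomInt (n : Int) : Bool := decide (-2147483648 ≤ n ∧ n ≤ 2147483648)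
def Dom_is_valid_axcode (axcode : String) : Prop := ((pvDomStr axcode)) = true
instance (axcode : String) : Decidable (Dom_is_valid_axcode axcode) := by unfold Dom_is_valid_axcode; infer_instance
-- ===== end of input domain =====

-- B replaces A's several independent scans (set-size distinctness, three any-tests, all-valid scan)
-- with one classifying pass mapping each char to its anatomical axis; objective: simpler.

-- ===== PORT A =====
def is_valid_axcode (axcode : String) : Bool :=
  if PySem.Str.len axcode ≠ 3 then false
  else if PySem.Set.len (PySem.Set.ofList axcode.toList) ≠ 3 then false
  else
    let has_lr := ("LR".toList).any (fun c => axcode.toList.contains c)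
    let has_ap := ("AP".toList).any (fun c => axcode.toList.contains c)
    let has_si := ("SI".toList).any (fun c => axcode.toList.contains c)
    let valid_chars := PySem.Set.ofList "LRAPSI".toList
    let has_only_valid := axcode.toList.all (fun c => PySem.Set.contains valid_chars c)
    has_lr && has_ap && has_si && has_only_valid

-- ===== PORT B =====
-- the module-level _AXIS dict of Source B
def pvAxisDict : PySem.Dict Char Int :=
  PySem.Dict.ofList [('L', 0), ('R', 0), ('A', 1), ('P', 1), ('S', 2), ('I', 2)]

-- the for-loop of Source B with its early returns, as structural recursion over the chars
def pvAxScan : List Char → PySem.Set Int → Bool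
  | [], _ => true
  | c :: rest, seen =>
    match PySem.Dict.get? pvAxisDict c with
    | none => false
    | some ax => if PySem.Set.contains seen ax then false else pvAxScan rest (PySem.Set.add seen ax)

def is_valid_axcode_alt (axcode : String) : Bool :=
  if PySem.Str.len axcode ≠ 3 then false
  else pvAxScan axcode.toList PySem.Set.empty

-- ===== PRECONDITION & SPEC =====
def Spec_is_valid_axcode (axcode : String) (out : Bool) : Prop := out = is_valid_axcode_alt axcode
instance (axcode : String) (out : Bool) : Decidable (Spec_is_valid_axcode axcode out) := by unfold Spec_is_valid_axcode; infer_instance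

-- ===== CLAIM (what is proved, stated in full; the proofs are below) =====
def Claim_equal_is_valid_axcode : Prop := ∀ (axcode : String), Dom_is_valid_axcode axcode → Spec_is_valid_axcode axcode (is_valid_axcode axcode)

-- ===== LEMMAS AND PROOFS =====

-- A's body and B's body as functions of the char list
def fA (l : List Char) : Bool :=
  if (l.length : Int) ≠ 3 then false
  else if PySem.Set.len (PySem.Set.ofList l) ≠ 3 then false
  else
    (("LR".toList).any (fun c => l.contains c) &&
     ("AP".toList).any (fun c => l.contains c) &&
     ("SI".toList).any (fun c => l.contains c) &&
     l.all (fun c => PySem.Set.contains (PySem.Set.ofList "LRAPSI".toList) c))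

def fB (l : List Char) : Bool := if (l.length : Int) ≠ 3 then false else pvAxScan l PySem.Set.empty

-- an invalid char is not a key of _AXIS
theorem pvGetNone (b : Char) (h1 : b ≠ 'L') (h2 : b ≠ 'R') (h3 : b ≠ 'A') (h4 : b ≠ 'P') (h5 : b ≠ 'S') (h6 : b ≠ 'I') :
    PySem.Dict.get? pvAxisDict b = none := by
  have e : pvAxisDict.items = [('L',(0:Int)),('R',0),('A',1),('P',1),('S',2),('I',2)] := rfl
  have r1 : ('L' == b) = false := by simp [h1.symm]
  have r2 : ('R' == b) = false := by simp [h2.symm]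
  have r3 : ('A' == b) = false := by simp [h3.symm]
  have r4 : ('P' == b) = false := by simp [h4.symm]
  have r5 : ('S' == b) = false := by simp [h5.symm]
  have r6 : ('I' == b) = false := by simp [h6.symm]
  simp [PySem.Dict.get?, e, List.find?, r1, r2, r3, r4, r5, r6]

theorem pvGetL : pvAxisDict.get? 'L' = some 0 := rfl
theorem pvGetR : pvAxisDict.get? 'R' = some 0 := rfl
theorem pvGetA : pvAxisDict.get? 'A' = some 1 := rfl
theorem pvGetP : pvAxisDict.get? 'P' = some 1 := rfl
theorem pvGetS : pvAxisDict.get? 'S' = some 2 := rfl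
theorem pvGetI : pvAxisDict.get? 'I' = some 2 := rfl

theorem pvCharCases (c : Char) :
    c = 'L' ∨ c = 'R' ∨ c = 'A' ∨ c = 'P' ∨ c = 'S' ∨ c = 'I' ∨
      (c ≠ 'L' ∧ c ≠ 'R' ∧ c ≠ 'A' ∧ c ≠ 'P' ∧ c ≠ 'S' ∧ c ≠ 'I') := by
  by_cases h1 : c = 'L' <;> by_cases h2 : c = 'R' <;> by_cases h3 : c = 'A' <;>
    by_cases h4 : c = 'P' <;> by_cases h5 : c = 'S' <;> by_cases h6 : c = 'I' <;> tauto

set_option maxHeartbeats 4000000 in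
theorem pvMain (l : List Char) : fA l = fB l := by
  by_cases hl : (l.length : Int) = 3
  · have h3 : l.length = 3 := by exact_mod_cast hl
    match l, h3 with
    | [a, b, c], _ =>
      rcases pvCharCases a with rfl | rfl | rfl | rfl | rfl | rfl | ⟨a1, a2, a3, a4, a5, a6⟩ <;>
        rcases pvCharCases b with rfl | rfl | rfl | rfl | rfl | rfl | ⟨b1, b2, b3, b4, b5, b6⟩ <;>
          rcases pvCharCases c with rfl | rfl | rfl | rfl | rfl | rfl | ⟨c1, c2, c3, c4, c5, c6⟩ <;>
            first
            | decide
            | simp_all [fA, fB, pvAxScan, pvGetNone, PySem.Set.contains, PySem.Set.ofList,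
                PySem.Set.add, PySem.Set.empty, PySem.Set.len, pvGetL, pvGetR, pvGetA, pvGetP, pvGetS, pvGetI]
  · simp [fA, fB, hl]

theorem is_valid_axcode_eq (s : String) : is_valid_axcode s = is_valid_axcode_alt s := by
  simpa [is_valid_axcode, is_valid_axcode_alt, fA, fB, PySem.Str.len] using pvMain s.toList

-- ===== VERDICT (by name: the statement is the Claim_ definition above) =====
theorem is_valid_axcode_spec : Claim_equal_is_valid_axcode := by
  intro axcode _
  unfold Spec_is_valid_axcode
  exact is_valid_axcode_eq axcode
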